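-- pv_equiv track=rewrite | github.com/RossOrlando/Wordle | wordle.py | find_combinations_triple
-- ===== SOURCE A (Python) =====
-- def find_combinations_triple(word_length, good_words_list):
-- 	"""
-- 	From the list of good words, check every unqiue triple combination
-- 	Only return those that have fully unique letters, defined as word_length * 3
-- 	"""
-- 	first_word = ""
-- 	second_word = ""
-- 	third_word = ""
-- 	combo_list = []
--
-- 	for x in range(len(good_words_list)):
--
-- 		for y in range(x + 1, len(good_words_list)):
--
-- 			for z in range(y + 1, len(good_words_list)):
--
-- 				first_word = good_words_list[x]
-- 				second_word = good_words_list[y]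
-- 				third_word = good_words_list[z]
-- 				total_letters = len(list(set(first_word + second_word + third_word)))
--
-- 				if total_letters == (word_length * 3):
-- 					combo_list.append(tuple((first_word, second_word, third_word)))
--
-- 	return combo_list
-- ===== SOURCE B (Python) =====
-- def _sort3(p, q, r):
-- 	if p > q:
-- 		p, q = q, p
-- 	if q > r:
-- 		q, r = r, q
-- 	if p > q:
-- 		p, q = q, p
-- 	return (p, q, r)
--
--
-- def find_combinations_triple(word_length, good_words_list):
-- 	target = word_length * 3
-- 	n = len(good_words_list)
-- 	# canonical letter-set key of each word
-- 	letset = [tuple(sorted(set(w))) for w in good_words_list]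
-- 	# distinct keys in first-occurrence order
-- 	keys = []
-- 	for k in letset:
-- 		if k not in keys:
-- 			keys.append(k)
-- 	m = len(keys)
-- 	# the indices carrying each key, ascending
-- 	groups = [[i for i in range(n) if letset[i] == k] for k in keys]
-- 	# test the letter condition once per multiset {a <= b <= c} of key ids,
-- 	# then expand each passing multiset to its index triples
-- 	triples = []
-- 	for a in range(m):
-- 		for b in range(a, m):
-- 			u = set(keys[a]) | set(keys[b])
-- 			for c in range(b, m):
-- 				if len(u | set(keys[c])) != target:
-- 					continue
-- 				for p in groups[a]:
-- 					for q in groups[b]: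
-- 						if a == b and q <= p:
-- 							continue
-- 						for r in groups[c]:
-- 							if b == c and r <= q:
-- 								continue
-- 							triples.append(_sort3(p, q, r))
-- 	# restore index-lexicographic order (encoded as one integer key)
-- 	triples.sort(key=lambda t: (t[0] * n + t[1]) * n + t[2])
-- 	return [(good_words_list[i], good_words_list[j], good_words_list[k]) for (i, j, k) in triples]
-- ===== Notes on version B (the rewrite author's own statement) =====
-- stated objective: faster
-- what changed: B groups words by their canonical letter-set key, tests the distinct-letter condition once per multiset of three key ids instead of once per word triple, expands each passing key multiset to its index triples, and restores A's index-lexicographic output order with a final sort.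
import Mathlib
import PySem

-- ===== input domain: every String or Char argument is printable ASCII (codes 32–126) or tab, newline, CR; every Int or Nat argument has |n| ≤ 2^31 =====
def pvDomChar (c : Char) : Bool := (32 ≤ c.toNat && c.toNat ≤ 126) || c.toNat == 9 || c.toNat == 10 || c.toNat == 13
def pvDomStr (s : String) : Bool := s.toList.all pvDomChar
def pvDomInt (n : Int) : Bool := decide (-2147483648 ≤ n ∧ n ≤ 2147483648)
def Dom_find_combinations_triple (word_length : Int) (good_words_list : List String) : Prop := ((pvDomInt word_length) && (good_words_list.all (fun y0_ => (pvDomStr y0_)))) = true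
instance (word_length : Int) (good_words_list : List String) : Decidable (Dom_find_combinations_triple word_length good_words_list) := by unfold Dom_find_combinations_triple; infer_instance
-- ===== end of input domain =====

-- B groups words by their canonical letter-set key, tests the distinct-letter condition once per multiset of
-- three key ids (instead of once per word triple), expands each passing key multiset to its index triples and
-- restores A's index-lexicographic output order with a final sort (objective: alternative algorithm).

-- ===== PORT A =====
def find_combinations_triple (word_length : Int) (good_words_list : List String) : List (List String) :=
  (PySem.List.pyRange 0 (good_words_list.length : Int) 1).foldl (fun combo_list x =>
    (PySem.List.pyRange (x + 1) (good_words_list.length : Int) 1).foldl (fun combo_list y =>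
      (PySem.List.pyRange (y + 1) (good_words_list.length : Int) 1).foldl (fun combo_list z =>
        let first_word := PySem.List.pyGetD good_words_list x ""
        let second_word := PySem.List.pyGetD good_words_list y ""
        let third_word := PySem.List.pyGetD good_words_list z ""
        let total_letters : Int :=
          PySem.Set.len (PySem.Set.ofList (first_word.toList ++ second_word.toList ++ third_word.toList))
        if total_letters = word_length * 3 then
          combo_list ++ [[first_word, second_word, third_word]]
        else combo_list) combo_list) combo_list) []

-- ===== PORT B =====
-- _sort3: the three swap steps of Source B, literally
def pvSort3 (p q r : Int) : Int × Int × Int :=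
  let s1 := if p > q then (q, p) else (p, q)
  let s2 := if s1.2 > r then (r, s1.2) else (s1.2, r)
  let s3 := if s1.1 > s2.1 then (s2.1, s1.1) else (s1.1, s2.1)
  (s3.1, s3.2, s2.2)

def find_combinations_triple_alt (word_length : Int) (good_words_list : List String) : List (List String) :=
  let target := word_length * 3
  let n : Int := good_words_list.length
  let letset : List (List Char) :=
    good_words_list.map (fun w => PySem.List.sorted (PySem.Set.ofList w.toList) (fun x => x) false)
  let keys : List (List Char) := letset.foldl (fun ks k => if k ∈ ks then ks else ks ++ [k]) []
  let m : Int := keys.length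
  let groups : List (List Int) :=
    keys.map (fun k => (PySem.List.pyRange 0 n 1).filter (fun i => PySem.List.pyGetD letset i [] == k))
  let triples : List (Int × Int × Int) :=
    (PySem.List.pyRange 0 m 1).foldl (fun ts a =>
      (PySem.List.pyRange a m 1).foldl (fun ts b =>
        let u := PySem.Set.union (PySem.Set.ofList (PySem.List.pyGetD keys a []))
                  (PySem.Set.ofList (PySem.List.pyGetD keys b []))
        (PySem.List.pyRange b m 1).foldl (fun ts c =>
          if PySem.Set.len (PySem.Set.union u (PySem.Set.ofList (PySem.List.pyGetD keys c []))) ≠ target then ts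
          else
            (PySem.List.pyGetD groups a []).foldl (fun ts p =>
              (PySem.List.pyGetD groups b []).foldl (fun ts q =>
                if a = b ∧ q ≤ p then ts
                else
                  (PySem.List.pyGetD groups c []).foldl (fun ts r =>
                    if b = c ∧ r ≤ q then ts
                    else ts ++ [pvSort3 p q r]) ts) ts) ts) ts) ts) []
  let sortedTriples := PySem.List.sorted triples (fun t => (t.1 * n + t.2.1) * n + t.2.2) false
  sortedTriples.map (fun t =>
    [PySem.List.pyGetD good_words_list t.1 "", PySem.List.pyGetD good_words_list t.2.1 "",
     PySem.List.pyGetD good_words_list t.2.2 ""])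

-- ===== PRECONDITION & SPEC =====
def Spec_find_combinations_triple (word_length : Int) (good_words_list : List String) (out : List (List String)) : Prop := out = find_combinations_triple_alt word_length good_words_list
instance (word_length : Int) (good_words_list : List String) (out : List (List String)) : Decidable (Spec_find_combinations_triple word_length good_words_list out) := by unfold Spec_find_combinations_triple; infer_instance

-- ===== CLAIM (what is proved, stated in full; the proofs are below) =====
def Claim_equal_find_combinations_triple : Prop := ∀ (word_length : Int) (good_words_list : List String), Dom_find_combinations_triple word_length good_words_list → Spec_find_combinations_triple word_length good_words_list (find_combinations_triple word_length good_words_list)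

-- ===== LEMMAS AND PROOFS =====

-- abbreviations for the shared data of the two programs
def pvW (gwl : List String) (i : Int) : String := PySem.List.pyGetD gwl i ""
def pvLetset (gwl : List String) : List (List Char) :=
  gwl.map (fun w => PySem.List.sorted (PySem.Set.ofList w.toList) (fun x => x) false)
def pvS (gwl : List String) (i : Int) : List Char := PySem.List.pyGetD (pvLetset gwl) i []
def pvKeys (gwl : List String) : List (List Char) := PySem.Set.ofList (pvLetset gwl)
def pvKA (gwl : List String) (a : Int) : List Char := PySem.List.pyGetD (pvKeys gwl) a []
def pvGroups (gwl : List String) : List (List Int) :=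
  (pvKeys gwl).map (fun k => (PySem.List.pyRange 0 (gwl.length : Int) 1).filter
    (fun i => PySem.List.pyGetD (pvLetset gwl) i [] == k))
def pvG (gwl : List String) (a : Int) : List Int := PySem.List.pyGetD (pvGroups gwl) a []
def pvM (gwl : List String) : Int := ((pvKeys gwl).length : Int)
def pvKi (gwl : List String) (i : Int) : Int := ((pvKeys gwl).idxOf (pvS gwl i) : Int)

@[reducible] def pvValid (wl : Int) (gwl : List String) (t : Int × Int × Int) : Prop :=
  PySem.Set.len (PySem.Set.ofList ((pvW gwl t.1).toList ++ (pvW gwl t.2.1).toList ++ (pvW gwl t.2.2).toList)) = wl * 3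

@[reducible] def pvVKey (wl : Int) (gwl : List String) (a b c : Int) : Prop :=
  PySem.Set.len (PySem.Set.union (PySem.Set.union (PySem.Set.ofList (pvKA gwl a))
    (PySem.Set.ofList (pvKA gwl b))) (PySem.Set.ofList (pvKA gwl c))) = wl * 3

def pvE (gwl : List String) (a b c : Int) : List (Int × Int × Int) :=
  (pvG gwl a).flatMap (fun p => (pvG gwl b).flatMap (fun q =>
    if a = b ∧ q ≤ p then []
    else (pvG gwl c).flatMap (fun r => if b = c ∧ r ≤ q then [] else [pvSort3 p q r])))

def pvGen (wl : Int) (gwl : List String) : List (Int × Int × Int) :=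
  (PySem.List.pyRange 0 (pvM gwl) 1).flatMap (fun a =>
    (PySem.List.pyRange a (pvM gwl) 1).flatMap (fun b =>
      (PySem.List.pyRange b (pvM gwl) 1).flatMap (fun c =>
        if pvVKey wl gwl a b c then pvE gwl a b c else [])))

def pvLex3 (n : Int) : List (Int × Int × Int) :=
  (PySem.List.pyRange 0 n 1).flatMap (fun x =>
    (PySem.List.pyRange (x + 1) n 1).flatMap (fun y =>
      (PySem.List.pyRange (y + 1) n 1).map (fun z => (x, y, z))))

def pvEmit (gwl : List String) (t : Int × Int × Int) : List String :=
  [pvW gwl t.1, pvW gwl t.2.1, pvW gwl t.2.2]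

def pvLexFilter (wl : Int) (gwl : List String) : List (Int × Int × Int) :=
  (pvLex3 (gwl.length : Int)).filter (fun t => decide (pvValid wl gwl t))

def pvEnc (n : Int) (t : Int × Int × Int) : Int := (t.1 * n + t.2.1) * n + t.2.2

-- ---- small generic helpers ----

theorem pvFoldlSkip {g b : Type} (l : List g) (gd : g -> Prop) [DecidablePred gd] (F : g -> List b)
    (acc : List b) :
    l.foldl (fun a x => if gd x then a else a ++ F x) acc
      = acc ++ l.flatMap (fun x => if gd x then [] else F x) := by
  induction l generalizing acc with
  | nil => simp
  | cons h t ih =>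
    simp only [List.foldl_cons, List.flatMap_cons]
    by_cases hg : gd h
    · rw [if_pos hg, if_pos hg, ih]; simp
    · rw [if_neg hg, if_neg hg, ih]; simp

theorem pvPermSwap12 (a b c : Int) : ([b, a, c] : List Int).Perm [a, b, c] := List.Perm.swap a b [c]
theorem pvPermSwap23 (a b c : Int) : ([a, c, b] : List Int).Perm [a, b, c] :=
  List.Perm.cons a (List.Perm.swap b c [])
theorem pvPermRot (a b c : Int) : ([b, c, a] : List Int).Perm [a, b, c] :=
  (List.Perm.cons b (List.Perm.swap a c [])).trans (pvPermSwap12 a b c)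
theorem pvPermRot2 (a b c : Int) : ([c, a, b] : List Int).Perm [a, b, c] :=
  (List.Perm.swap a c [b]).trans (pvPermSwap23 a b c)
theorem pvPermRev (a b c : Int) : ([c, b, a] : List Int).Perm [a, b, c] :=
  (List.Perm.swap b c [a]).trans (pvPermRot a b c)

-- ---- pvSort3 facts ----

theorem pvSort3_eq (p q r : Int) :
    pvSort3 p q r =
      if p > q then (if p > r then (if q > r then (r, q, p) else (q, r, p)) else (q, p, r))
      else (if q > r then (if p > r then (r, p, q) else (p, r, q)) else (p, q, r)) := by
  unfold pvSort3
  by_cases c1 : p > q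
  · simp only [if_pos c1]
    by_cases c3 : p > r
    · simp only [if_pos c3]
      by_cases c2 : q > r <;> simp [c2]
    · simp only [if_neg c3]
      have hqp : ¬ q > p := by omega
      simp [hqp]
  · simp only [if_neg c1]
    by_cases c2 : q > r
    · simp only [if_pos c2]
      by_cases c3 : p > r <;> simp [c3]
    · simp only [if_neg c2]
      simp [c1]

theorem pvSort3_perm (p q r : Int) :
    [(pvSort3 p q r).1, (pvSort3 p q r).2.1, (pvSort3 p q r).2.2].Perm [p, q, r] := by
  rw [pvSort3_eq]
  split_ifs
  · exact pvPermRev p q r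
  · exact pvPermRot p q r
  · exact pvPermSwap12 p q r
  · exact pvPermRot2 p q r
  · exact pvPermSwap23 p q r
  · exact List.Perm.refl _

theorem pvSort3_le (p q r : Int) :
    (pvSort3 p q r).1 ≤ (pvSort3 p q r).2.1 ∧ (pvSort3 p q r).2.1 ≤ (pvSort3 p q r).2.2 := by
  rw [pvSort3_eq]
  split_ifs <;> dsimp only <;> omega

theorem pvSort3_of_le {p q r : Int} (h1 : p ≤ q) (h2 : q ≤ r) : pvSort3 p q r = (p, q, r) := by
  rw [pvSort3_eq]
  split_ifs <;> first | rfl | (exfalso; omega)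

theorem pvSort3_congr {p q r p' q' r' : Int} (h : [p, q, r].Perm [p', q', r']) :
    pvSort3 p q r = pvSort3 p' q' r' := by
  have s := pvSort3_perm p q r
  have s' := pvSort3_perm p' q' r'
  have hL : [(pvSort3 p q r).1, (pvSort3 p q r).2.1, (pvSort3 p q r).2.2].Perm
      [(pvSort3 p' q' r').1, (pvSort3 p' q' r').2.1, (pvSort3 p' q' r').2.2] :=
    (s.trans h).trans s'.symm
  have le1 := pvSort3_le p q r
  have le2 := pvSort3_le p' q' r'
  have P1 : List.Pairwise (· ≤ ·)
      [(pvSort3 p q r).1, (pvSort3 p q r).2.1, (pvSort3 p q r).2.2] := by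
    refine List.Pairwise.cons (fun v hv => ?_) (List.Pairwise.cons (fun v hv => ?_)
      (List.pairwise_singleton _ _))
    · simp only [List.mem_cons, List.mem_singleton, List.not_mem_nil, or_false] at hv
      rcases hv with rfl | rfl
      · exact le1.1
      · exact le1.1.trans le1.2
    · simp only [List.mem_singleton] at hv
      subst hv
      exact le1.2
  have P2 : List.Pairwise (· ≤ ·)
      [(pvSort3 p' q' r').1, (pvSort3 p' q' r').2.1, (pvSort3 p' q' r').2.2] := by
    refine List.Pairwise.cons (fun v hv => ?_) (List.Pairwise.cons (fun v hv => ?_)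
      (List.pairwise_singleton _ _))
    · simp only [List.mem_cons, List.mem_singleton, List.not_mem_nil, or_false] at hv
      rcases hv with rfl | rfl
      · exact le2.1
      · exact le2.1.trans le2.2
    · simp only [List.mem_singleton] at hv
      subst hv
      exact le2.2
  have heq := List.Perm.eq_of_pairwise (le := (· ≤ ·))
    (fun a b _ _ hab hba => le_antisymm hab hba) P1 P2 hL
  simp only [List.cons.injEq, and_true] at heq
  obtain ⟨h1, h2, h3⟩ := heq
  exact Prod.ext h1 (Prod.ext h2 h3)

theorem pvSort3_strict {p q r : Int} (h1 : p ≠ q) (h2 : q ≠ r) (h3 : p ≠ r) :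
    (pvSort3 p q r).1 < (pvSort3 p q r).2.1 ∧ (pvSort3 p q r).2.1 < (pvSort3 p q r).2.2 := by
  have hnd : ([p, q, r] : List Int).Nodup := by
    simp only [List.nodup_cons, List.mem_cons, List.mem_singleton, List.not_mem_nil,
      List.nodup_nil, and_true, not_false_iff, or_false]
    omega
  have hnd2 := (pvSort3_perm p q r).nodup_iff.mpr hnd
  simp only [List.nodup_cons, List.mem_cons, List.mem_singleton, List.not_mem_nil,
    List.nodup_nil, and_true, not_false_iff, or_false] at hnd2
  have hle := pvSort3_le p q r
  omega

-- ---- letter-set facts ----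

theorem pvLenOfList_congr {l l' : List Char} (h : ∀ c, c ∈ l ↔ c ∈ l') :
    PySem.Set.len (PySem.Set.ofList l) = PySem.Set.len (PySem.Set.ofList l') := by
  have hp : (PySem.Set.ofList l).Perm (PySem.Set.ofList l') :=
    (List.perm_ext_iff_of_nodup (PySem.Set.nodup_ofList _) (PySem.Set.nodup_ofList _)).mpr
      (fun c => by simp only [PySem.Set.mem_ofList]; exact h c)
  simp [PySem.Set.len, hp.length_eq]

theorem pvUnionOfList (a b : List Char) :
    PySem.Set.union (PySem.Set.ofList a) (PySem.Set.ofList b) = PySem.Set.ofList (a ++ b) := by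
  show PySem.Set.update (PySem.Set.ofList a) (PySem.Set.ofList b) = _
  rw [PySem.Set.ofList_append, PySem.Set.update_eq_append_filter, PySem.Set.update_eq_append_filter,
      PySem.Set.ofList_ofList]

-- ---- keys / groups / ki facts ----

theorem pvKeys_nodup (gwl : List String) : (pvKeys gwl).Nodup := PySem.Set.nodup_ofList _

theorem pvS_mem_letset (gwl : List String) {i : Int} (h0 : 0 ≤ i) (h1 : i < (gwl.length : Int)) :
    pvS gwl i ∈ pvLetset gwl := by
  unfold pvS
  apply PySem.List.pyGetD_mem
  constructor <;> simp [pvLetset] <;> omega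

theorem pvS_mem_keys (gwl : List String) {i : Int} (h0 : 0 ≤ i) (h1 : i < (gwl.length : Int)) :
    pvS gwl i ∈ pvKeys gwl :=
  (PySem.Set.mem_ofList _ _).mpr (pvS_mem_letset gwl h0 h1)

theorem pvKi_range (gwl : List String) {i : Int} (h0 : 0 ≤ i) (h1 : i < (gwl.length : Int)) :
    0 ≤ pvKi gwl i ∧ pvKi gwl i < pvM gwl := by
  have hm := pvS_mem_keys gwl h0 h1
  have hlt : (pvKeys gwl).idxOf (pvS gwl i) < (pvKeys gwl).length := List.idxOf_lt_length_of_mem hm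
  unfold pvKi pvM
  omega

theorem pvKA_ki (gwl : List String) {i : Int} (h0 : 0 ≤ i) (h1 : i < (gwl.length : Int)) :
    pvKA gwl (pvKi gwl i) = pvS gwl i := by
  have hr := pvKi_range gwl h0 h1
  unfold pvKA
  rw [PySem.List.pyGetD_eq_getElem _ _ hr.1 (by simpa [pvM] using hr.2)]
  exact List.getElem_idxOf (List.idxOf_lt_length_of_mem (pvS_mem_keys gwl h0 h1))

theorem pvKi_eq_iff (gwl : List String) {i a : Int} (h0 : 0 ≤ i) (h1 : i < (gwl.length : Int))
    (ha0 : 0 ≤ a) (ha1 : a < pvM gwl) : pvKA gwl a = pvS gwl i ↔ a = pvKi gwl i := by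
  constructor
  · intro h
    have h2 := pvKA_ki gwl h0 h1
    have hr := pvKi_range gwl h0 h1
    unfold pvKA at h h2
    rw [PySem.List.pyGetD_eq_getElem _ _ ha0 (by simpa [pvM] using ha1)] at h
    rw [PySem.List.pyGetD_eq_getElem _ _ hr.1 (by simpa [pvM] using hr.2)] at h2
    have h3 := ((pvKeys_nodup gwl).getElem_inj_iff).mp (h.trans h2.symm)
    omega
  · rintro rfl
    exact pvKA_ki gwl h0 h1

theorem pvG_eq (gwl : List String) {a : Int} (ha0 : 0 ≤ a) (ha1 : a < pvM gwl) :
    pvG gwl a = (PySem.List.pyRange 0 (gwl.length : Int) 1).filter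
      (fun i => PySem.List.pyGetD (pvLetset gwl) i [] == pvKA gwl a) := by
  unfold pvG pvGroups pvKA
  rw [PySem.List.pyGetD_eq_getElem _ _ ha0 (by simpa [pvM] using ha1),
      PySem.List.pyGetD_eq_getElem _ _ ha0 (by simpa [pvM] using ha1)]
  simp

theorem pvG_mem (gwl : List String) {a : Int} (ha0 : 0 ≤ a) (ha1 : a < pvM gwl) (p : Int) :
    p ∈ pvG gwl a ↔ 0 ≤ p ∧ p < (gwl.length : Int) ∧ pvKi gwl p = a := by
  rw [pvG_eq gwl ha0 ha1]
  simp only [List.mem_filter, PySem.List.mem_pyRange_one, beq_iff_eq]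
  constructor
  · rintro ⟨⟨hp0, hp1⟩, heq⟩
    refine ⟨hp0, hp1, ?_⟩
    exact ((pvKi_eq_iff gwl hp0 hp1 ha0 ha1).mp heq.symm).symm
  · rintro ⟨hp0, hp1, heq⟩
    refine ⟨⟨hp0, hp1⟩, ?_⟩
    exact ((pvKi_eq_iff gwl hp0 hp1 ha0 ha1).mpr heq.symm).symm

theorem pvG_pairwise (gwl : List String) {a : Int} (ha0 : 0 ≤ a) (ha1 : a < pvM gwl) :
    (pvG gwl a).Pairwise (· < ·) := by
  rw [pvG_eq gwl ha0 ha1]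
  exact (PySem.List.pairwise_lt_pyRange_one 0 _).filter _

theorem pvS_eq (gwl : List String) {i : Int} (h0 : 0 ≤ i) (h1 : i < (gwl.length : Int)) :
    pvS gwl i = PySem.List.sorted (PySem.Set.ofList (pvW gwl i).toList) (fun x => x) false := by
  unfold pvS pvLetset pvW
  rw [PySem.List.pyGetD_eq_getElem _ _ h0 (by simpa using h1),
      PySem.List.pyGetD_eq_getElem _ _ h0 h1]
  simp

theorem pvS_mem_iff (gwl : List String) {i : Int} (h0 : 0 ≤ i) (h1 : i < (gwl.length : Int)) (c : Char) :
    c ∈ pvS gwl i ↔ c ∈ (pvW gwl i).toList := by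
  rw [pvS_eq gwl h0 h1]
  rw [PySem.List.mem_sorted]
  exact PySem.Set.mem_ofList _ _

theorem pvValid_iff_S (wl : Int) (gwl : List String) {x y z : Int}
    (hx0 : 0 ≤ x) (hx1 : x < (gwl.length : Int)) (hy0 : 0 ≤ y) (hy1 : y < (gwl.length : Int))
    (hz0 : 0 ≤ z) (hz1 : z < (gwl.length : Int)) :
    pvValid wl gwl (x, y, z) ↔
      PySem.Set.len (PySem.Set.ofList (pvS gwl x ++ pvS gwl y ++ pvS gwl z)) = wl * 3 := by
  unfold pvValid
  dsimp only
  rw [pvLenOfList_congr (l' := pvS gwl x ++ pvS gwl y ++ pvS gwl z) (fun c => by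
    simp only [List.mem_append, pvS_mem_iff gwl hx0 hx1 c, pvS_mem_iff gwl hy0 hy1 c,
      pvS_mem_iff gwl hz0 hz1 c])]

theorem pvVKey_iff (wl : Int) (gwl : List String) (a b c : Int) :
    pvVKey wl gwl a b c ↔
      PySem.Set.len (PySem.Set.ofList (pvKA gwl a ++ pvKA gwl b ++ pvKA gwl c)) = wl * 3 := by
  unfold pvVKey
  rw [pvUnionOfList, pvUnionOfList]

theorem pvConcat3_mem_aux {l1 l2 l3 l1' l2' l3' : List Char}
    (h : ([l1, l2, l3] : List (List Char)).Perm [l1', l2', l3']) {c : Char}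
    (hc : c ∈ l1 ++ l2 ++ l3) : c ∈ l1' ++ l2' ++ l3' := by
  simp only [List.mem_append] at hc ⊢
  rcases hc with (h1 | h1) | h1
  · have hm : (l1 : List Char) ∈ [l1', l2', l3'] := h.mem_iff.mp (by simp)
    simp only [List.mem_cons, List.not_mem_nil, or_false] at hm
    rcases hm with rfl | rfl | rfl <;> tauto
  · have hm : (l2 : List Char) ∈ [l1', l2', l3'] := h.mem_iff.mp (by simp)
    simp only [List.mem_cons, List.not_mem_nil, or_false] at hm
    rcases hm with rfl | rfl | rfl <;> tauto
  · have hm : (l3 : List Char) ∈ [l1', l2', l3'] := h.mem_iff.mp (by simp)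
    simp only [List.mem_cons, List.not_mem_nil, or_false] at hm
    rcases hm with rfl | rfl | rfl <;> tauto

theorem pvConcat3_mem {l1 l2 l3 l1' l2' l3' : List Char}
    (h : ([l1, l2, l3] : List (List Char)).Perm [l1', l2', l3'])
    (c : Char) : c ∈ l1 ++ l2 ++ l3 ↔ c ∈ l1' ++ l2' ++ l3' :=
  ⟨pvConcat3_mem_aux h, pvConcat3_mem_aux h.symm⟩

-- ---- generation uniqueness and membership ----

theorem pvKappa_lt (gwl : List String) {a b p q : Int} (hab : a ≤ b)
    (hp0 : 0 ≤ p) (hp1 : p < (gwl.length : Int)) (hq0 : 0 ≤ q) (hq1 : q < (gwl.length : Int))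
    (hkp : pvKi gwl p = a) (hkq : pvKi gwl q = b) (g : ¬(a = b ∧ q ≤ p)) :
    pvKi gwl p * (gwl.length : Int) + p < pvKi gwl q * (gwl.length : Int) + q := by
  rcases eq_or_lt_of_le hab with heq | hlt
  · have hpq : p < q := by omega
    rw [hkp, hkq, ← heq]
    linarith
  · have h1 : (pvKi gwl p + 1) * (gwl.length : Int) ≤ pvKi gwl q * (gwl.length : Int) :=
      mul_le_mul_of_nonneg_right (by omega) (by omega)
    linarith

theorem pvGen_unique (gwl : List String) {a b c p q r p' q' r' : Int}
    (hab : a ≤ b) (hbc : b ≤ c) (ha0 : 0 ≤ a) (hc1 : c < pvM gwl)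
    (hp : p ∈ pvG gwl a) (hq : q ∈ pvG gwl b) (hr : r ∈ pvG gwl c)
    (hp' : p' ∈ pvG gwl a) (hq' : q' ∈ pvG gwl b) (hr' : r' ∈ pvG gwl c)
    (g1 : ¬(a = b ∧ q ≤ p)) (g2 : ¬(b = c ∧ r ≤ q))
    (g1' : ¬(a = b ∧ q' ≤ p')) (g2' : ¬(b = c ∧ r' ≤ q'))
    (heq : pvSort3 p q r = pvSort3 p' q' r') : p = p' ∧ q = q' ∧ r = r' := by
  obtain ⟨hp0, hp1, hkp⟩ := (pvG_mem gwl (by omega) (by omega) p).mp hp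
  obtain ⟨hq0, hq1, hkq⟩ := (pvG_mem gwl (by omega) (by omega) q).mp hq
  obtain ⟨hr0, hr1, hkr⟩ := (pvG_mem gwl (by omega) (by omega) r).mp hr
  obtain ⟨hp0', hp1', hkp'⟩ := (pvG_mem gwl (by omega) (by omega) p').mp hp'
  obtain ⟨hq0', hq1', hkq'⟩ := (pvG_mem gwl (by omega) (by omega) q').mp hq'
  obtain ⟨hr0', hr1', hkr'⟩ := (pvG_mem gwl (by omega) (by omega) r').mp hr'
  have kpq := pvKappa_lt gwl hab hp0 hp1 hq0 hq1 hkp hkq g1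
  have kqr := pvKappa_lt gwl hbc hq0 hq1 hr0 hr1 hkq hkr g2
  have kpr := kpq.trans kqr
  have kpq' := pvKappa_lt gwl hab hp0' hp1' hq0' hq1' hkp' hkq' g1'
  have kqr' := pvKappa_lt gwl hbc hq0' hq1' hr0' hr1' hkq' hkr' g2'
  have kpr' := kpq'.trans kqr'
  have hperm : ([p, q, r] : List Int).Perm [p', q', r'] :=
    ((pvSort3_perm p q r).symm.trans (by rw [heq]; exact pvSort3_perm p' q' r'))
  have P1 : List.Pairwise (fun i j => pvKi gwl i * (gwl.length : Int) + i
      < pvKi gwl j * (gwl.length : Int) + j) [p, q, r] := by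
    refine List.Pairwise.cons (fun v hv => ?_) (List.Pairwise.cons (fun v hv => ?_)
      (List.pairwise_singleton _ _))
    · simp only [List.mem_cons, List.mem_singleton, List.not_mem_nil, or_false] at hv
      rcases hv with rfl | rfl
      · exact kpq
      · exact kpr
    · simp only [List.mem_singleton] at hv
      subst hv
      exact kqr
  have P2 : List.Pairwise (fun i j => pvKi gwl i * (gwl.length : Int) + i
      < pvKi gwl j * (gwl.length : Int) + j) [p', q', r'] := by
    refine List.Pairwise.cons (fun v hv => ?_) (List.Pairwise.cons (fun v hv => ?_)
      (List.pairwise_singleton _ _))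
    · simp only [List.mem_cons, List.mem_singleton, List.not_mem_nil, or_false] at hv
      rcases hv with rfl | rfl
      · exact kpq'
      · exact kpr'
    · simp only [List.mem_singleton] at hv
      subst hv
      exact kqr'
  have heql := List.Perm.eq_of_pairwise
    (fun i j _ _ hij hji => absurd hji (lt_asymm hij)) P1 P2 hperm
  simp only [List.cons.injEq, and_true] at heql
  exact ⟨heql.1, heql.2.1, heql.2.2⟩

theorem pvE_intro (gwl : List String) {a b c p q r : Int}
    (hp : p ∈ pvG gwl a) (hq : q ∈ pvG gwl b) (hr : r ∈ pvG gwl c)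
    (g1 : ¬(a = b ∧ q ≤ p)) (g2 : ¬(b = c ∧ r ≤ q)) : pvSort3 p q r ∈ pvE gwl a b c := by
  unfold pvE
  refine List.mem_flatMap.mpr ⟨p, hp, ?_⟩
  refine List.mem_flatMap.mpr ⟨q, hq, ?_⟩
  rw [if_neg g1]
  refine List.mem_flatMap.mpr ⟨r, hr, ?_⟩
  rw [if_neg g2]
  simp

theorem pvE_inner_elim {gwl : List String} {a b c p q : Int} {t : Int × Int × Int}
    (ht : t ∈ (if a = b ∧ q ≤ p then ([] : List (Int × Int × Int))
      else (pvG gwl c).flatMap (fun r => if b = c ∧ r ≤ q then [] else [pvSort3 p q r]))) :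
    ∃ r, r ∈ pvG gwl c ∧ ¬(a = b ∧ q ≤ p) ∧ ¬(b = c ∧ r ≤ q) ∧ t = pvSort3 p q r := by
  by_cases g1 : a = b ∧ q ≤ p
  · rw [if_pos g1] at ht; simp at ht
  · rw [if_neg g1] at ht
    obtain ⟨r, hr, ht⟩ := List.mem_flatMap.mp ht
    by_cases g2 : b = c ∧ r ≤ q
    · rw [if_pos g2] at ht; simp at ht
    · rw [if_neg g2] at ht
      simp only [List.mem_singleton] at ht
      exact ⟨r, hr, g1, g2, ht⟩

theorem pvE_elim {gwl : List String} {a b c : Int} {t : Int × Int × Int}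
    (ht : t ∈ pvE gwl a b c) :
    ∃ p q r, p ∈ pvG gwl a ∧ q ∈ pvG gwl b ∧ r ∈ pvG gwl c ∧ ¬(a = b ∧ q ≤ p) ∧
      ¬(b = c ∧ r ≤ q) ∧ t = pvSort3 p q r := by
  unfold pvE at ht
  obtain ⟨p, hp, ht⟩ := List.mem_flatMap.mp ht
  obtain ⟨q, hq, ht⟩ := List.mem_flatMap.mp ht
  obtain ⟨r, hr, g1, g2, ht⟩ := pvE_inner_elim ht
  exact ⟨p, q, r, hp, hq, hr, g1, g2, ht⟩

theorem pvE_mem (gwl : List String) {a b c : Int}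
    (hab : a ≤ b) (hbc : b ≤ c) (ha0 : 0 ≤ a) (hc1 : c < pvM gwl) (t : Int × Int × Int) :
    t ∈ pvE gwl a b c ↔
      0 ≤ t.1 ∧ t.1 < t.2.1 ∧ t.2.1 < t.2.2 ∧ t.2.2 < (gwl.length : Int) ∧
        pvSort3 (pvKi gwl t.1) (pvKi gwl t.2.1) (pvKi gwl t.2.2) = (a, b, c) := by
  constructor
  · intro ht
    obtain ⟨p, q, r, hp, hq, hr, g1, g2, rfl⟩ := pvE_elim ht
    obtain ⟨hp0, hp1, hkp⟩ := (pvG_mem gwl (by omega) (by omega) p).mp hp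
    obtain ⟨hq0, hq1, hkq⟩ := (pvG_mem gwl (by omega) (by omega) q).mp hq
    obtain ⟨hr0, hr1, hkr⟩ := (pvG_mem gwl (by omega) (by omega) r).mp hr
    have hpq : p ≠ q := by intro he; rw [← he] at hkq; omega
    have hqr : q ≠ r := by intro he; rw [← he] at hkr; omega
    have hpr : p ≠ r := by intro he; rw [← he] at hkr; omega
    have st := pvSort3_strict hpq hqr hpr
    have pm := pvSort3_perm p q r
    have hmem1 : (pvSort3 p q r).1 ∈ ([p, q, r] : List Int) := pm.mem_iff.mp (by simp)
    have hmem3 : (pvSort3 p q r).2.2 ∈ ([p, q, r] : List Int) := pm.mem_iff.mp (by simp)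
    have hb1 : 0 ≤ (pvSort3 p q r).1 := by
      simp only [List.mem_cons, List.not_mem_nil, or_false] at hmem1
      rcases hmem1 with h | h | h <;> rw [h] <;> omega
    have hb3 : (pvSort3 p q r).2.2 < (gwl.length : Int) := by
      simp only [List.mem_cons, List.not_mem_nil, or_false] at hmem3
      rcases hmem3 with h | h | h <;> rw [h] <;> omega
    refine ⟨hb1, st.1, st.2, hb3, ?_⟩
    have hmap : [pvKi gwl (pvSort3 p q r).1, pvKi gwl (pvSort3 p q r).2.1,
        pvKi gwl (pvSort3 p q r).2.2].Perm [pvKi gwl p, pvKi gwl q, pvKi gwl r] := by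
      have := pm.map (pvKi gwl)
      simpa using this
    rw [hkp, hkq, hkr] at hmap
    rw [pvSort3_congr hmap]
    exact pvSort3_of_le hab hbc
  · obtain ⟨x, y, z⟩ := t
    rintro ⟨h1, h2, h3, h4, hsort⟩
    dsimp only at h1 h2 h3 h4 hsort
    have hx0 : (0:Int) ≤ x := h1
    have hx1 : x < (gwl.length : Int) := by omega
    have hy0 : (0:Int) ≤ y := by omega
    have hy1 : y < (gwl.length : Int) := by omega
    have hz0 : (0:Int) ≤ z := by omega
    have hz1 : z < (gwl.length : Int) := h4
    have hkx := pvKi_range gwl hx0 hx1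
    have hky := pvKi_range gwl hy0 hy1
    have hkz := pvKi_range gwl hz0 hz1
    set k1 := pvKi gwl x with hk1
    set k2 := pvKi gwl y with hk2
    set k3 := pvKi gwl z with hk3
    by_cases h21 : k2 < k1
    · by_cases h32 : k3 < k2
      · -- order z, y, x
        have hs : pvSort3 k1 k2 k3 = (k3, k2, k1) :=
          (pvSort3_congr (pvPermRev k3 k2 k1)).trans (pvSort3_of_le (by omega) (by omega))
        have habc := hsort.symm.trans hs
        simp only [Prod.mk.injEq] at habc
        obtain ⟨ha, hb, hc⟩ := habc
        have hmz : z ∈ pvG gwl a := (pvG_mem gwl ha0 (by omega) z).mpr ⟨hz0, hz1, by omega⟩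
        have hmy : y ∈ pvG gwl b := (pvG_mem gwl (by omega) (by omega) y).mpr ⟨hy0, hy1, by omega⟩
        have hmx : x ∈ pvG gwl c := (pvG_mem gwl (by omega) hc1 x).mpr ⟨hx0, hx1, by omega⟩
        have ht : pvSort3 z y x = (x, y, z) :=
          (pvSort3_congr (pvPermRev x y z)).trans (pvSort3_of_le (by omega) (by omega))
        rw [show ((x, y, z) : Int × Int × Int) = pvSort3 z y x from ht.symm]
        exact pvE_intro gwl hmz hmy hmx (by omega) (by omega)
      · by_cases h31 : k3 < k1
        · -- order y, z, x
          have hs : pvSort3 k1 k2 k3 = (k2, k3, k1) :=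
            (pvSort3_congr (pvPermRot2 k2 k3 k1)).trans (pvSort3_of_le (by omega) (by omega))
          have habc := hsort.symm.trans hs
          simp only [Prod.mk.injEq] at habc
          obtain ⟨ha, hb, hc⟩ := habc
          have hmy : y ∈ pvG gwl a := (pvG_mem gwl ha0 (by omega) y).mpr ⟨hy0, hy1, by omega⟩
          have hmz : z ∈ pvG gwl b := (pvG_mem gwl (by omega) (by omega) z).mpr ⟨hz0, hz1, by omega⟩
          have hmx : x ∈ pvG gwl c := (pvG_mem gwl (by omega) hc1 x).mpr ⟨hx0, hx1, by omega⟩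
          have ht : pvSort3 y z x = (x, y, z) :=
            (pvSort3_congr (pvPermRot x y z)).trans (pvSort3_of_le (by omega) (by omega))
          rw [show ((x, y, z) : Int × Int × Int) = pvSort3 y z x from ht.symm]
          exact pvE_intro gwl hmy hmz hmx (by omega) (by omega)
        · -- order y, x, z
          have hs : pvSort3 k1 k2 k3 = (k2, k1, k3) :=
            (pvSort3_congr (pvPermSwap12 k2 k1 k3)).trans (pvSort3_of_le (by omega) (by omega))
          have habc := hsort.symm.trans hs
          simp only [Prod.mk.injEq] at habc
          obtain ⟨ha, hb, hc⟩ := habc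
          have hmy : y ∈ pvG gwl a := (pvG_mem gwl ha0 (by omega) y).mpr ⟨hy0, hy1, by omega⟩
          have hmx : x ∈ pvG gwl b := (pvG_mem gwl (by omega) (by omega) x).mpr ⟨hx0, hx1, by omega⟩
          have hmz : z ∈ pvG gwl c := (pvG_mem gwl (by omega) hc1 z).mpr ⟨hz0, hz1, by omega⟩
          have ht : pvSort3 y x z = (x, y, z) :=
            (pvSort3_congr (pvPermSwap12 x y z)).trans (pvSort3_of_le (by omega) (by omega))
          rw [show ((x, y, z) : Int × Int × Int) = pvSort3 y x z from ht.symm]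
          exact pvE_intro gwl hmy hmx hmz (by omega) (by omega)
    · by_cases h32 : k3 < k2
      · by_cases h31 : k3 < k1
        · -- order z, x, y
          have hs : pvSort3 k1 k2 k3 = (k3, k1, k2) :=
            (pvSort3_congr (pvPermRot k3 k1 k2)).trans (pvSort3_of_le (by omega) (by omega))
          have habc := hsort.symm.trans hs
          simp only [Prod.mk.injEq] at habc
          obtain ⟨ha, hb, hc⟩ := habc
          have hmz : z ∈ pvG gwl a := (pvG_mem gwl ha0 (by omega) z).mpr ⟨hz0, hz1, by omega⟩
          have hmx : x ∈ pvG gwl b := (pvG_mem gwl (by omega) (by omega) x).mpr ⟨hx0, hx1, by omega⟩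
          have hmy : y ∈ pvG gwl c := (pvG_mem gwl (by omega) hc1 y).mpr ⟨hy0, hy1, by omega⟩
          have ht : pvSort3 z x y = (x, y, z) :=
            (pvSort3_congr (pvPermRot2 x y z)).trans (pvSort3_of_le (by omega) (by omega))
          rw [show ((x, y, z) : Int × Int × Int) = pvSort3 z x y from ht.symm]
          exact pvE_intro gwl hmz hmx hmy (by omega) (by omega)
        · -- order x, z, y
          have hs : pvSort3 k1 k2 k3 = (k1, k3, k2) :=
            (pvSort3_congr (pvPermSwap23 k1 k3 k2)).trans (pvSort3_of_le (by omega) (by omega))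
          have habc := hsort.symm.trans hs
          simp only [Prod.mk.injEq] at habc
          obtain ⟨ha, hb, hc⟩ := habc
          have hmx : x ∈ pvG gwl a := (pvG_mem gwl ha0 (by omega) x).mpr ⟨hx0, hx1, by omega⟩
          have hmz : z ∈ pvG gwl b := (pvG_mem gwl (by omega) (by omega) z).mpr ⟨hz0, hz1, by omega⟩
          have hmy : y ∈ pvG gwl c := (pvG_mem gwl (by omega) hc1 y).mpr ⟨hy0, hy1, by omega⟩
          have ht : pvSort3 x z y = (x, y, z) :=
            (pvSort3_congr (pvPermSwap23 x y z)).trans (pvSort3_of_le (by omega) (by omega))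
          rw [show ((x, y, z) : Int × Int × Int) = pvSort3 x z y from ht.symm]
          exact pvE_intro gwl hmx hmz hmy (by omega) (by omega)
      · -- order x, y, z
        have hs : pvSort3 k1 k2 k3 = (k1, k2, k3) := pvSort3_of_le (by omega) (by omega)
        have habc := hsort.symm.trans hs
        simp only [Prod.mk.injEq] at habc
        obtain ⟨ha, hb, hc⟩ := habc
        have hmx : x ∈ pvG gwl a := (pvG_mem gwl ha0 (by omega) x).mpr ⟨hx0, hx1, by omega⟩
        have hmy : y ∈ pvG gwl b := (pvG_mem gwl (by omega) (by omega) y).mpr ⟨hy0, hy1, by omega⟩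
        have hmz : z ∈ pvG gwl c := (pvG_mem gwl (by omega) hc1 z).mpr ⟨hz0, hz1, by omega⟩
        have ht : pvSort3 x y z = (x, y, z) := pvSort3_of_le (by omega) (by omega)
        rw [show ((x, y, z) : Int × Int × Int) = pvSort3 x y z from ht.symm]
        exact pvE_intro gwl hmx hmy hmz (by omega) (by omega)

theorem pvE_nodup (gwl : List String) {a b c : Int}
    (hab : a ≤ b) (hbc : b ≤ c) (ha0 : 0 ≤ a) (hc1 : c < pvM gwl) :
    (pvE gwl a b c).Nodup := by
  unfold pvE
  refine List.nodup_flatMap.mpr ⟨?_, ?_⟩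
  · intro p hp
    refine List.nodup_flatMap.mpr ⟨?_, ?_⟩
    · intro q hq
      by_cases g1 : a = b ∧ q ≤ p
      · simp [g1]
      · rw [if_neg g1]
        refine List.nodup_flatMap.mpr ⟨?_, ?_⟩
        · intro r hr
          by_cases g2 : b = c ∧ r ≤ q <;> simp [g2]
        · refine (pvG_pairwise gwl (by omega) hc1).imp_of_mem ?_
          intro r r' hr hr' hlt t ht ht'
          dsimp only at ht ht'
          by_cases g2 : b = c ∧ r ≤ q
          · rw [if_pos g2] at ht; simp at ht
          · by_cases g2' : b = c ∧ r' ≤ q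
            · rw [if_pos g2'] at ht'; simp at ht'
            · rw [if_neg g2] at ht; rw [if_neg g2'] at ht'
              simp only [List.mem_singleton] at ht ht'
              subst ht
              have := pvGen_unique gwl hab hbc ha0 hc1 hp hq hr hp hq hr' g1 g2 g1 g2' ht'
              omega
    · refine (pvG_pairwise gwl (by omega) (by omega)).imp_of_mem ?_
      intro q q' hq hq' hlt t ht ht'
      dsimp only at ht ht'
      obtain ⟨r, hr, g1, g2, rfl⟩ := pvE_inner_elim ht
      obtain ⟨r', hr', g1', g2', heq⟩ := pvE_inner_elim ht'
      have := pvGen_unique gwl hab hbc ha0 hc1 hp hq hr hp hq' hr' g1 g2 g1' g2' heq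
      omega
  · refine (pvG_pairwise gwl ha0 (by omega)).imp_of_mem ?_
    intro p p' hp hp' hlt t ht ht'
    dsimp only at ht ht'
    obtain ⟨q, hq, ht⟩ := List.mem_flatMap.mp ht
    obtain ⟨r, hr, g1, g2, rfl⟩ := pvE_inner_elim ht
    obtain ⟨q', hq', ht'⟩ := List.mem_flatMap.mp ht'
    obtain ⟨r', hr', g1', g2', heq⟩ := pvE_inner_elim ht'
    have := pvGen_unique gwl hab hbc ha0 hc1 hp hq hr hp' hq' hr' g1 g2 g1' g2' heq
    omega

theorem pvGen_item_pin (wl : Int) (gwl : List String) {a b c : Int} {t : Int × Int × Int}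
    (hab : a ≤ b) (hbc : b ≤ c) (ha0 : 0 ≤ a) (hc1 : c < pvM gwl)
    (ht : t ∈ (if pvVKey wl gwl a b c then pvE gwl a b c else [])) :
    pvSort3 (pvKi gwl t.1) (pvKi gwl t.2.1) (pvKi gwl t.2.2) = (a, b, c) := by
  by_cases hv : pvVKey wl gwl a b c
  · rw [if_pos hv] at ht
    exact ((pvE_mem gwl hab hbc ha0 hc1 t).mp ht).2.2.2.2
  · rw [if_neg hv] at ht; simp at ht

theorem pvGen_nodup (wl : Int) (gwl : List String) : (pvGen wl gwl).Nodup := by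
  unfold pvGen
  refine List.nodup_flatMap.mpr ⟨?_, ?_⟩
  · intro a ha
    rw [PySem.List.mem_pyRange_one] at ha
    refine List.nodup_flatMap.mpr ⟨?_, ?_⟩
    · intro b hb
      rw [PySem.List.mem_pyRange_one] at hb
      refine List.nodup_flatMap.mpr ⟨?_, ?_⟩
      · intro c hc
        rw [PySem.List.mem_pyRange_one] at hc
        by_cases hv : pvVKey wl gwl a b c
        · rw [if_pos hv]
          exact pvE_nodup gwl (by omega) (by omega) (by omega) (by omega)
        · simp [hv]
      · refine (PySem.List.pairwise_lt_pyRange_one _ _).imp_of_mem ?_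
        intro c c' hc hc' hlt t ht ht'
        rw [PySem.List.mem_pyRange_one] at hc hc'
        have p1 := pvGen_item_pin wl gwl (by omega) (by omega) (by omega) (by omega) ht
        have p2 := pvGen_item_pin wl gwl (by omega) (by omega) (by omega) (by omega) ht'
        rw [p1] at p2
        simp only [Prod.mk.injEq] at p2
        omega
    · refine (PySem.List.pairwise_lt_pyRange_one _ _).imp_of_mem ?_
      intro b b' hb hb' hlt t ht ht'
      rw [PySem.List.mem_pyRange_one] at hb hb'
      obtain ⟨c, hc, htc⟩ := List.mem_flatMap.mp ht
      obtain ⟨c', hc', htc'⟩ := List.mem_flatMap.mp ht'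
      rw [PySem.List.mem_pyRange_one] at hc hc'
      have p1 := pvGen_item_pin wl gwl (by omega) (by omega) (by omega) (by omega) htc
      have p2 := pvGen_item_pin wl gwl (by omega) (by omega) (by omega) (by omega) htc'
      rw [p1] at p2
      simp only [Prod.mk.injEq] at p2
      omega
  · refine (PySem.List.pairwise_lt_pyRange_one _ _).imp_of_mem ?_
    intro a a' ha ha' hlt t ht ht'
    rw [PySem.List.mem_pyRange_one] at ha ha'
    obtain ⟨b, hb, ht⟩ := List.mem_flatMap.mp ht
    obtain ⟨c, hc, htc⟩ := List.mem_flatMap.mp ht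
    obtain ⟨b', hb', ht'⟩ := List.mem_flatMap.mp ht'
    obtain ⟨c', hc', htc'⟩ := List.mem_flatMap.mp ht'
    rw [PySem.List.mem_pyRange_one] at hb hc hb' hc'
    have p1 := pvGen_item_pin wl gwl (by omega) (by omega) (by omega) (by omega) htc
    have p2 := pvGen_item_pin wl gwl (by omega) (by omega) (by omega) (by omega) htc'
    rw [p1] at p2
    simp only [Prod.mk.injEq] at p2
    omega

theorem pvValid_iff_vkey (wl : Int) (gwl : List String) {x y z a b c : Int}
    (hx0 : 0 ≤ x) (hx1 : x < (gwl.length : Int)) (hy0 : 0 ≤ y) (hy1 : y < (gwl.length : Int))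
    (hz0 : 0 ≤ z) (hz1 : z < (gwl.length : Int))
    (hsort : pvSort3 (pvKi gwl x) (pvKi gwl y) (pvKi gwl z) = (a, b, c)) :
    pvVKey wl gwl a b c ↔ pvValid wl gwl (x, y, z) := by
  rw [pvVKey_iff, pvValid_iff_S wl gwl hx0 hx1 hy0 hy1 hz0 hz1]
  have hperm : ([a, b, c] : List Int).Perm [pvKi gwl x, pvKi gwl y, pvKi gwl z] := by
    have h := pvSort3_perm (pvKi gwl x) (pvKi gwl y) (pvKi gwl z)
    rw [hsort] at h
    simpa using h
  have hKA : ([pvKA gwl a, pvKA gwl b, pvKA gwl c] : List (List Char)).Perm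
      [pvS gwl x, pvS gwl y, pvS gwl z] := by
    have h := hperm.map (pvKA gwl)
    simp only [List.map_cons, List.map_nil] at h
    rwa [pvKA_ki gwl hx0 hx1, pvKA_ki gwl hy0 hy1, pvKA_ki gwl hz0 hz1] at h
  rw [pvLenOfList_congr (pvConcat3_mem hKA)]

-- ---- lex enumeration facts ----

theorem pvLex3_mem (n : Int) (t : Int × Int × Int) :
    t ∈ pvLex3 n ↔ 0 ≤ t.1 ∧ t.1 < t.2.1 ∧ t.2.1 < t.2.2 ∧ t.2.2 < n := by
  obtain ⟨x, y, z⟩ := t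
  show (x, y, z) ∈ pvLex3 n ↔ 0 ≤ x ∧ x < y ∧ y < z ∧ z < n
  simp only [pvLex3, List.mem_flatMap, List.mem_map, PySem.List.mem_pyRange_one, Prod.mk.injEq]
  constructor
  · rintro ⟨a, ⟨ha0, ha1⟩, b, ⟨hb0, hb1⟩, c, ⟨hc0, hc1⟩, rfl, rfl, rfl⟩
    exact ⟨ha0, by omega, by omega, hc1⟩
  · rintro ⟨h1, h2, h3, h4⟩
    exact ⟨x, ⟨h1, by omega⟩, y, ⟨by omega, by omega⟩, z, ⟨by omega, h4⟩, rfl, rfl, rfl⟩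

theorem pvLex3_inner_elim {n x : Int} {t : Int × Int × Int}
    (ht : t ∈ (PySem.List.pyRange (x + 1) n 1).flatMap
      (fun y => (PySem.List.pyRange (y + 1) n 1).map (fun z => (x, y, z)))) :
    t.1 = x ∧ x < t.2.1 ∧ t.2.1 < t.2.2 ∧ t.2.2 < n := by
  obtain ⟨y, hy, ht⟩ := List.mem_flatMap.mp ht
  obtain ⟨z, hz, rfl⟩ := List.mem_map.mp ht
  rw [PySem.List.mem_pyRange_one] at hy hz
  exact ⟨rfl, (by omega : x < y), (by omega : y < z), (by omega : z < n)⟩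

theorem pvLex3_nodup (n : Int) : (pvLex3 n).Nodup := by
  unfold pvLex3
  refine List.nodup_flatMap.mpr ⟨?_, ?_⟩
  · intro x hx
    refine List.nodup_flatMap.mpr ⟨?_, ?_⟩
    · intro y hy
      exact List.Nodup.map (fun z z' h => by simpa using h) (PySem.List.nodup_pyRange_one _ _)
    · refine (PySem.List.pairwise_lt_pyRange_one _ _).imp_of_mem ?_
      intro y y' hy hy' hlt t ht ht'
      obtain ⟨z, hz, rfl⟩ := List.mem_map.mp ht
      obtain ⟨z', hz', heq⟩ := List.mem_map.mp ht'
      simp only [Prod.mk.injEq] at heq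
      omega
  · refine (PySem.List.pairwise_lt_pyRange_one _ _).imp_of_mem ?_
    intro x x' hx hx' hlt t ht ht'
    have e1 := (pvLex3_inner_elim ht).1
    have e2 := (pvLex3_inner_elim ht').1
    omega

theorem pvEnc_lt (n : Int) {t s : Int × Int × Int}
    (ht : 0 ≤ t.1 ∧ t.1 < t.2.1 ∧ t.2.1 < t.2.2 ∧ t.2.2 < n)
    (hs : 0 ≤ s.1 ∧ s.1 < s.2.1 ∧ s.2.1 < s.2.2 ∧ s.2.2 < n)
    (hlex : t.1 < s.1 ∨ (t.1 = s.1 ∧ (t.2.1 < s.2.1 ∨ (t.2.1 = s.2.1 ∧ t.2.2 < s.2.2)))) :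
    pvEnc n t < pvEnc n s := by
  obtain ⟨h1, h2, h3, h4⟩ := ht
  obtain ⟨g1, g2, g3, g4⟩ := hs
  have hn : (0:Int) < n := by omega
  unfold pvEnc
  have hX : t.1 * n + t.2.1 < s.1 * n + s.2.1 ∨
      (t.1 * n + t.2.1 = s.1 * n + s.2.1 ∧ t.2.2 < s.2.2) := by
    rcases hlex with h | ⟨heq, h | ⟨heq2, h⟩⟩
    · left
      have hm : (t.1 + 1) * n ≤ s.1 * n := mul_le_mul_of_nonneg_right (by omega) (by omega)
      nlinarith
    · left; rw [heq]; linarith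
    · right; rw [heq, heq2]; exact ⟨rfl, h⟩
  rcases hX with h | ⟨heq, h⟩
  · have hm : (t.1 * n + t.2.1 + 1) * n ≤ (s.1 * n + s.2.1) * n :=
      mul_le_mul_of_nonneg_right (by omega) (by omega)
    nlinarith
  · rw [heq]; linarith

theorem pvLex3_pairwise (n : Int) : (pvLex3 n).Pairwise (fun t s => pvEnc n t < pvEnc n s) := by
  unfold pvLex3
  refine List.pairwise_flatMap.mpr ⟨?_, ?_⟩
  · intro x hx
    rw [PySem.List.mem_pyRange_one] at hx
    refine List.pairwise_flatMap.mpr ⟨?_, ?_⟩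
    · intro y hy
      rw [PySem.List.mem_pyRange_one] at hy
      rw [List.pairwise_map]
      refine (PySem.List.pairwise_lt_pyRange_one _ _).imp_of_mem ?_
      intro z z' hz hz' hlt
      rw [PySem.List.mem_pyRange_one] at hz hz'
      exact pvEnc_lt n (t := (x, y, z)) (s := (x, y, z')) (by dsimp only; omega)
        (by dsimp only; omega) (by right; exact ⟨rfl, by right; exact ⟨rfl, hlt⟩⟩)
    · refine (PySem.List.pairwise_lt_pyRange_one _ _).imp_of_mem ?_
      intro y y' hy hy' hlt t ht s hs
      rw [PySem.List.mem_pyRange_one] at hy hy'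
      obtain ⟨z, hz, rfl⟩ := List.mem_map.mp ht
      obtain ⟨z', hz', rfl⟩ := List.mem_map.mp hs
      rw [PySem.List.mem_pyRange_one] at hz hz'
      exact pvEnc_lt n (t := (x, y, z)) (s := (x, y', z')) (by dsimp only; omega)
        (by dsimp only; omega) (by right; exact ⟨rfl, by left; exact hlt⟩)
  · refine (PySem.List.pairwise_lt_pyRange_one _ _).imp_of_mem ?_
    intro x x' hx hx' hlt t ht s hs
    rw [PySem.List.mem_pyRange_one] at hx hx'
    obtain ⟨e1, e2, e3, e4⟩ := pvLex3_inner_elim ht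
    obtain ⟨f1, f2, f3, f4⟩ := pvLex3_inner_elim hs
    exact pvEnc_lt n (by omega) (by omega) (by left; omega)

theorem pvGen_mem (wl : Int) (gwl : List String) (t : Int × Int × Int) :
    t ∈ pvGen wl gwl ↔ t ∈ pvLexFilter wl gwl := by
  constructor
  · intro ht
    unfold pvGen at ht
    obtain ⟨a, ha, ht⟩ := List.mem_flatMap.mp ht
    obtain ⟨b, hb, ht⟩ := List.mem_flatMap.mp ht
    obtain ⟨c, hc, ht⟩ := List.mem_flatMap.mp ht
    rw [PySem.List.mem_pyRange_one] at ha hb hc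
    by_cases hv : pvVKey wl gwl a b c
    swap
    · rw [if_neg hv] at ht; simp at ht
    rw [if_pos hv] at ht
    obtain ⟨h1, h2, h3, h4, hsort⟩ :=
      (pvE_mem gwl (by omega) (by omega) (by omega) (by omega) t).mp ht
    unfold pvLexFilter
    rw [List.mem_filter]
    constructor
    · rw [pvLex3_mem]; exact ⟨h1, h2, h3, h4⟩
    · simp only [decide_eq_true_eq]
      have hval := (pvValid_iff_vkey wl gwl h1 (by omega) (by omega) (by omega) (by omega) h4
        hsort).mp hv
      exact hval
  · intro ht
    unfold pvLexFilter at ht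
    rw [List.mem_filter] at ht
    obtain ⟨hl, hvd⟩ := ht
    rw [pvLex3_mem] at hl
    obtain ⟨h1, h2, h3, h4⟩ := hl
    simp only [decide_eq_true_eq] at hvd
    have hkx := pvKi_range gwl h1 (by omega)
    have hky := pvKi_range gwl (by omega : (0:Int) ≤ t.2.1) (by omega)
    have hkz := pvKi_range gwl (by omega : (0:Int) ≤ t.2.2) h4
    set s := pvSort3 (pvKi gwl t.1) (pvKi gwl t.2.1) (pvKi gwl t.2.2) with hs
    have hsort : pvSort3 (pvKi gwl t.1) (pvKi gwl t.2.1) (pvKi gwl t.2.2)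
        = (s.1, s.2.1, s.2.2) := rfl
    have hle := pvSort3_le (pvKi gwl t.1) (pvKi gwl t.2.1) (pvKi gwl t.2.2)
    have pm := pvSort3_perm (pvKi gwl t.1) (pvKi gwl t.2.1) (pvKi gwl t.2.2)
    have hbounds : ∀ u ∈ ([s.1, s.2.1, s.2.2] : List Int), 0 ≤ u ∧ u < pvM gwl := by
      intro u hu
      have hm := pm.mem_iff.mp (by rw [hs] at hu; exact hu)
      simp only [List.mem_cons, List.mem_singleton, List.not_mem_nil, or_false] at hm
      rcases hm with rfl | rfl | rfl
      · exact hkx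
      · exact hky
      · exact hkz
    have hb1 := hbounds s.1 (by simp)
    have hb2 := hbounds s.2.1 (by simp)
    have hb3 := hbounds s.2.2 (by simp)
    rw [← hs] at hle
    unfold pvGen
    refine List.mem_flatMap.mpr ⟨s.1, ?_, List.mem_flatMap.mpr ⟨s.2.1, ?_,
      List.mem_flatMap.mpr ⟨s.2.2, ?_, ?_⟩⟩⟩
    · rw [PySem.List.mem_pyRange_one]
      exact ⟨hb1.1, hb1.2⟩
    · rw [PySem.List.mem_pyRange_one]
      exact ⟨hle.1, hb2.2⟩
    · rw [PySem.List.mem_pyRange_one]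
      exact ⟨hle.2, hb3.2⟩
    · have hv : pvVKey wl gwl s.1 s.2.1 s.2.2 :=
        (pvValid_iff_vkey wl gwl h1 (by omega) (by omega) (by omega) (by omega) h4 hsort).mpr hvd
      rw [if_pos hv]
      exact (pvE_mem gwl hle.1 hle.2 hb1.1 hb3.2 t).mpr ⟨h1, h2, h3, h4, hsort⟩

-- ---- the two normal forms ----

theorem pvA_eq (wl : Int) (gwl : List String) :
    find_combinations_triple wl gwl = (pvLexFilter wl gwl).map (pvEmit gwl) := by
  unfold find_combinations_triple pvLexFilter pvLex3 pvEmit pvValid pvW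
  simp only [PySem.List.foldl_append_ite, PySem.List.foldl_append_eq_flatMap, List.nil_append,
    List.filter_flatMap, List.map_flatMap, List.filter_map, List.map_map, Function.comp_def]

theorem pvB_eq (wl : Int) (gwl : List String) :
    find_combinations_triple_alt wl gwl
      = (PySem.List.sorted (pvGen wl gwl) (pvEnc (gwl.length : Int)) false).map (pvEmit gwl) := by
  have hfold : (pvLetset gwl).foldl
      (fun (ks : List (List Char)) k => if k ∈ ks then ks else ks ++ [k]) []
      = pvKeys gwl := by
    have hfun : (fun (ks : List (List Char)) k => if k ∈ ks then ks else ks ++ [k])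
        = PySem.Set.add := by
      funext ks k
      exact (PySem.Set.add_eq_ite ks k).symm
    rw [hfun]
    unfold pvKeys
    rw [PySem.Set.ofList_eq_foldl]
  unfold find_combinations_triple_alt
  dsimp only
  rw [show (gwl.map
      (fun w => PySem.List.sorted (PySem.Set.ofList w.toList) (fun x => x) false))
      = pvLetset gwl from rfl]
  rw [hfold]
  unfold pvGen pvE pvVKey pvKA pvG pvGroups pvM pvEnc pvEmit pvW
  simp only [pvFoldlSkip, PySem.List.foldl_append_eq_flatMap, List.nil_append]
  simp only [ne_eq, ite_not]

theorem pvSorted_gen (wl : Int) (gwl : List String) :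
    PySem.List.sorted (pvGen wl gwl) (pvEnc (gwl.length : Int)) false = pvLexFilter wl gwl := by
  apply PySem.List.sorted_eq_of_perm_of_pairwise_lt
  · exact (List.perm_ext_iff_of_nodup
      (by unfold pvLexFilter; exact (pvLex3_nodup _).filter _) (pvGen_nodup wl gwl)).mpr
      (fun t => (pvGen_mem wl gwl t).symm)
  · unfold pvLexFilter
    exact (pvLex3_pairwise _).filter _

-- ===== VERDICT (by name: the statement is the Claim_ definition above) =====
theorem find_combinations_triple_spec : Claim_equal_find_combinations_triple := by
  intro wl gwl _
  unfold Spec_find_combinations_triple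
  rw [pvA_eq, pvB_eq, pvSorted_gen]
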